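-- pv_equiv track=rewrite | github.com/buttaRamesh/gas_app | backend/commands/management/commands/validate_consumer_addresses.py | validate_consumers
-- ===== SOURCE A (Python) =====
-- def validate_consumers(consumers, route_areas):
--     """
--     Check if consumer addresses contain any route area name.
--     Returns list of invalid consumers (address doesn't contain any area).
--     """
--     invalid_consumers = []
--
--     for consumer_number, address in consumers:
--         # Convert address to uppercase for comparison
--         address_upper = address.upper()
--
--         # Check if ANY area name is in the address
--         area_found = any(area in address_upper for area in route_areas)
--
--         if not area_found:
--             invalid_consumers.append((consumer_number, address))
--
--     return invalid_consumers
-- ===== SOURCE B (Python) =====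
-- def validate_consumers(consumers, route_areas):
--     """
--     Check if consumer addresses contain any route area name.
--     Returns list of invalid consumers (address doesn't contain any area).
--
--     Pattern-major elimination: each area filters out the consumers it
--     matches, so later areas only scan the still-unmatched consumers and
--     each address is uppercased once.
--     """
--     remaining = [(pair, pair[1].upper()) for pair in consumers]
--     for area in route_areas:
--         remaining = [(pair, u) for pair, u in remaining if area not in u]
--     return [pair for pair, _ in remaining]
-- ===== Notes on version B (the rewrite author's own statement) =====
-- stated objective: alternative
-- what changed: B swaps the loop nesting: instead of testing every area against each consumer's address, it keeps a list of still-unmatched consumers (paired with their address uppercased once) and lets each route area filter out the consumers whose address contains it, returning the survivors.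
import Mathlib
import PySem

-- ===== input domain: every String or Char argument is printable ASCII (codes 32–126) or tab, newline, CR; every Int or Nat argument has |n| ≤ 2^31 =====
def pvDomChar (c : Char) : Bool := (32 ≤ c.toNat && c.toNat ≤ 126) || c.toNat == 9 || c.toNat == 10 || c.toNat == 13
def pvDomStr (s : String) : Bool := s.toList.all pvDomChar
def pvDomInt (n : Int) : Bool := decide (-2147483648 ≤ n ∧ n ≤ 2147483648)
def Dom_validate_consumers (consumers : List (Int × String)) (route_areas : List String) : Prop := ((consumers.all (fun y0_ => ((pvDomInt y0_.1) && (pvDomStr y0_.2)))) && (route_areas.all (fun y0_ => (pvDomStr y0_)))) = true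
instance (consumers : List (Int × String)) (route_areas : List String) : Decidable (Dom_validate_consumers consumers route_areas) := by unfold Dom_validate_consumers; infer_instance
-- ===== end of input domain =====

-- B swaps the loop nesting: each route area eliminates the consumers it matches, so the result is proved equal below.
-- ===== PORT A =====
def validate_consumers (consumers : List (Int × String)) (route_areas : List String) : List (Int × String) :=
  consumers.foldl (fun invalid_consumers p =>
    let address_upper := PySem.Str.upper p.2
    let area_found := route_areas.any (fun area => PySem.Str.isIn area address_upper)
    if !area_found then invalid_consumers ++ [(p.1, p.2)] else invalid_consumers) []

-- ===== PORT B =====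
-- pattern-major elimination: each area filters out the consumers it matches
def validate_consumers_alt (consumers : List (Int × String)) (route_areas : List String) : List (Int × String) :=
  let remaining := consumers.map (fun pair => (pair, PySem.Str.upper pair.2))
  let remaining := route_areas.foldl
    (fun remaining area => remaining.filter (fun q => ! PySem.Str.isIn area q.2)) remaining
  remaining.map (fun q => q.1)

-- ===== PRECONDITION & SPEC =====
def Spec_validate_consumers (consumers : List (Int × String)) (route_areas : List String) (out : List (Int × String)) : Prop := out = validate_consumers_alt consumers route_areas
instance (consumers : List (Int × String)) (route_areas : List String) (out : List (Int × String)) : Decidable (Spec_validate_consumers consumers route_areas out) := by unfold Spec_validate_consumers; infer_instance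

-- ===== CLAIM (what is proved, stated in full; the proofs are below) =====
def Claim_equal_validate_consumers : Prop := ∀ (consumers : List (Int × String)) (route_areas : List String), Dom_validate_consumers consumers route_areas → Spec_validate_consumers consumers route_areas (validate_consumers consumers route_areas)

-- ===== LEMMAS AND PROOFS =====
-- a fold of successive filters is one filter by the conjunction of all the tests
theorem foldl_filter_eq_filter_all {α β : Type} (f : β → α → Bool) (l : List β) (l0 : List α) :
    l.foldl (fun acc b => acc.filter (f b)) l0 = l0.filter (fun x => l.all (fun b => f b x)) := by
  induction l generalizing l0 with
  | nil => simp
  | cons b bs ih =>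
    simp only [List.foldl_cons, ih, List.filter_filter, List.all_cons]
    congr 1
    funext x
    rw [Bool.and_comm]

-- ===== VERDICT (by name: the statement is the Claim_ definition above) =====
theorem validate_consumers_spec : Claim_equal_validate_consumers := by
  intro consumers route_areas _
  unfold Spec_validate_consumers validate_consumers validate_consumers_alt
  rw [PySem.List.foldl_append_if_eq_filter
      (p := fun p : Int × String =>
        ! route_areas.any (fun area => PySem.Str.isIn area (PySem.Str.upper p.2)))]
  simp only [foldl_filter_eq_filter_all, List.filter_map]
  simp [Function.comp_def, PySem.Str.toList_upper, List.all_eq_not_any_not]
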